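-- pv_equiv track=rewrite | github.com/BinPy/BinPy | BinPy/dev/parseEquation.py | removeBraces
-- ===== SOURCE A (Python) =====
-- def removeBraces(position, equation):
--     """
--     Removes braces due to clubbing of the gates
--     position indicates the index of the clubbed gate
--     """
--     eq = equation
--     if position != -1:
--         eq = equation[:position]
--         stack = 0
--         for i in equation[position:]:
--             if (i == '(') and (stack != -1):
--                 stack += 1
--                 eq += i
--                 # print i,stack,eq
--             elif (i == ')') and (stack != -1):
--                 stack -= 1
--                 if stack == 0:
--                     # If the current index corresponds to the ) of the
--                     # removed gate.
--                     stack = -1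
--                     # print i,stack,eq
--                 else:
--                     eq += i
--                     # print i,stack,eq
--             else:
--                 eq += i
--                 # print i,stack,eq
--     return eq
-- ===== SOURCE B (Python) =====
-- def _removal_index(s):
--     """Return the index in s of the ')' that closes the clubbed gate opened
--     at s[0]'s position, or None if removal is disabled (a stray ')' at depth 0
--     or an unbalanced string)."""
--     depth = 0
--     for idx, ch in enumerate(s):
--         if ch == '(':
--             depth += 1
--         elif ch == ')':
--             if depth == 0:
--                 return None
--             if depth == 1:
--                 return idx
--             depth -= 1
--     return None
--
--
-- def removeBraces(position, equation):
--     """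
--     Removes braces due to clubbing of the gates
--     position indicates the index of the clubbed gate
--     """
--     if position == -1:
--         return equation
--     suffix = equation[position:]
--     j = _removal_index(suffix)
--     if j is None:
--         return equation
--     return equation[:position] + suffix[:j] + suffix[j + 1:]
-- ===== Notes on version B (the rewrite author's own statement) =====
-- stated objective: simpler
-- what changed: B first computes (by a depth scan) the index of the single ')' to delete, then builds the result with three slices, instead of A's character-by-character string accumulation with a sentinel stack value; when no removal applies B returns the input unchanged.
import Mathlib
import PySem

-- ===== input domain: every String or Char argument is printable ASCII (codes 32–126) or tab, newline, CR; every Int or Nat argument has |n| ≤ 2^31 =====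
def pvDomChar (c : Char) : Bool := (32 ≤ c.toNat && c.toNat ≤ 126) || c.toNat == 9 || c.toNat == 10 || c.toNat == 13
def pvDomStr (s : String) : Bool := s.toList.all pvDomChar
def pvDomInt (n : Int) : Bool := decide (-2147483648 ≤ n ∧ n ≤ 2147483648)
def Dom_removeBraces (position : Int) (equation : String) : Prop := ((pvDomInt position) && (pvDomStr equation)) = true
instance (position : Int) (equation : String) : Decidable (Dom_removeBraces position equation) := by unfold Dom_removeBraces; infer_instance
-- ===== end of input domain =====

-- B computes the index of the single ')' to delete with one depth scan and then
-- builds the result from three slices, instead of A's char-by-char accumulation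
-- with a sentinel stack value (objective: simpler; same behaviour everywhere).

-- ===== PORT A =====
-- A's for-loop over equation[position:], carrying the accumulated string `eq`
-- and the int `stack` (with -1 as A's "done" sentinel), branch for branch.
def removeBracesLoop : List Char → List Char → Int → List Char
  | [], eq, _ => eq
  | c :: rest, eq, stack =>
    if c = '(' ∧ stack ≠ -1 then removeBracesLoop rest (eq ++ [c]) (stack + 1)
    else if c = ')' ∧ stack ≠ -1 then
      if stack - 1 = 0 then removeBracesLoop rest eq (-1)
      else removeBracesLoop rest (eq ++ [c]) (stack - 1)
    else removeBracesLoop rest (eq ++ [c]) stack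

def removeBraces (position : Int) (equation : String) : String :=
  if position ≠ -1 then
    String.ofList (removeBracesLoop (PySem.List.slice equation.toList (some position) none)
      (PySem.List.slice equation.toList none (some position)) 0)
  else equation

-- ===== PORT B =====
-- B's helper _removal_index: enumerate-loop with an index counter and a Nat depth.
def findRB : List Char → Nat → Nat → Option Nat
  | [], _, _ => none
  | c :: rest, idx, depth =>
    if c = '(' then findRB rest (idx + 1) (depth + 1)
    else if c = ')' then
      if depth = 0 then none
      else if depth = 1 then some idx
      else findRB rest (idx + 1) (depth - 1)
    else findRB rest (idx + 1) depth

def removeBraces_alt (position : Int) (equation : String) : String :=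
  if position = -1 then equation
  else
    let suffix := PySem.List.slice equation.toList (some position) none
    match findRB suffix 0 0 with
    | none => equation
    | some j =>
      String.ofList (PySem.List.slice equation.toList none (some position) ++
        (PySem.List.slice suffix none (some (j : Int)) ++
         PySem.List.slice suffix (some ((j : Int) + 1)) none))

-- ===== PRECONDITION & SPEC =====
def Spec_removeBraces (position : Int) (equation : String) (out : String) : Prop := out = removeBraces_alt position equation
instance (position : Int) (equation : String) (out : String) : Decidable (Spec_removeBraces position equation out) := by unfold Spec_removeBraces; infer_instance

-- ===== CLAIM (what is proved, stated in full; the proofs are below) =====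
def Claim_equal_removeBraces : Prop := ∀ (position : Int) (equation : String), Dom_removeBraces position equation → Spec_removeBraces position equation (removeBraces position equation)

-- ===== LEMMAS AND PROOFS =====

-- Once A's stack hits the sentinel -1, every remaining char is appended.
theorem removeBracesLoop_neg_one (s : List Char) : ∀ eq, removeBracesLoop s eq (-1) = eq ++ s := by
  induction s with
  | nil => intro eq; simp [removeBracesLoop]
  | cons c rest ih =>
    intro eq
    simp [removeBracesLoop, ih]

-- Shifting the index counter of B's scan shifts the returned index.
theorem findRB_idx_shift (s : List Char) : ∀ (i d : Nat), findRB s i d = (findRB s 0 d).map (· + i) := by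
  induction s with
  | nil => intro i d; simp [findRB]
  | cons c rest ih =>
    intro i d
    by_cases h1 : c = '('
    · rw [findRB, findRB, if_pos h1, if_pos h1, ih (i + 1), ih 1]
      cases findRB rest 0 (d + 1) <;> simp <;> omega
    · by_cases h2 : c = ')'
      · rw [findRB, findRB, if_neg h1, if_neg h1, if_pos h2, if_pos h2]
        by_cases hd0 : d = 0
        · simp [hd0]
        · by_cases hd1 : d = 1
          · simp [hd1]
          · rw [if_neg hd0, if_neg hd0, if_neg hd1, if_neg hd1, ih (i + 1), ih 1]
            cases findRB rest 0 (d - 1) <;> simp <;> omega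
      · rw [findRB, findRB, if_neg h1, if_neg h1, if_neg h2, if_neg h2, ih (i + 1), ih 1]
        cases findRB rest 0 d <;> simp <;> omega

-- Main invariant: A's loop started at a nonnegative stack d equals
-- "delete the char at B's removal index, if any".
theorem loop_eq_find (s : List Char) : ∀ (eq : List Char) (d : Nat),
    removeBracesLoop s eq (d : Int) =
      match findRB s 0 d with
      | none => eq ++ s
      | some j => eq ++ (s.take j ++ s.drop (j + 1)) := by
  induction s with
  | nil => intro eq d; simp [removeBracesLoop, findRB]
  | cons c rest ih =>
    intro eq d
    have hne : (d : Int) ≠ -1 := by omega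
    by_cases h1 : c = '('
    · rw [removeBracesLoop, if_pos ⟨h1, hne⟩]
      have : (d : Int) + 1 = ((d + 1 : Nat) : Int) := by omega
      rw [this, ih, findRB, if_pos h1, findRB_idx_shift rest 1 (d + 1)]
      cases findRB rest 0 (d + 1) <;> simp
    · by_cases h2 : c = ')'
      · rw [removeBracesLoop, if_neg (by simp [h1]), if_pos ⟨h2, hne⟩, findRB, if_neg h1, if_pos h2]
        by_cases hd0 : d = 0
        · subst hd0
          rw [if_neg (by omega)]
          simp only [Nat.cast_zero, zero_sub, removeBracesLoop_neg_one]
          simp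
        · by_cases hd1 : d = 1
          · subst hd1
            rw [if_pos (by omega), removeBracesLoop_neg_one]
            norm_num
          · rw [if_neg (by omega), if_neg hd0, if_neg hd1]
            have : (d : Int) - 1 = ((d - 1 : Nat) : Int) := by omega
            rw [this, ih, findRB_idx_shift rest 1 (d - 1)]
            cases findRB rest 0 (d - 1) <;> simp
      · rw [removeBracesLoop, if_neg (by simp [h1]), if_neg (by simp [h2]),
          ih, findRB, if_neg h1, if_neg h2, findRB_idx_shift rest 1 d]
        cases findRB rest 0 d <;> simp

-- The two halves of a Python slice split rebuild the list, for any Int cut point.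
theorem slice_split (xs : List Char) (p : Int) :
    PySem.List.slice xs none (some p) ++ PySem.List.slice xs (some p) none = xs := by
  have h1 : List.take (xs.length - PySem.List.clampIdx xs.length p)
      (List.drop (PySem.List.clampIdx xs.length p) xs) =
      List.drop (PySem.List.clampIdx xs.length p) xs :=
    List.take_of_length_le (by simp)
  simp [PySem.List.slice, h1]

-- take/drop view of the slices B uses (nonnegative natural index j).
theorem slice_take (xs : List Char) (j : Nat) :
    PySem.List.slice xs none (some (j : Int)) = xs.take j :=
  PySem.List.slice_to_natCast xs j

theorem slice_drop_succ (xs : List Char) (j : Nat) :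
    PySem.List.slice xs (some ((j : Int) + 1)) none = xs.drop (j + 1) := by
  have : (j : Int) + 1 = ((j + 1 : Nat) : Int) := by omega
  rw [this, PySem.List.slice_from_natCast]

-- ===== VERDICT (by name: the statement is the Claim_ definition above) =====
theorem removeBraces_spec : Claim_equal_removeBraces := by
  intro position equation _
  unfold Spec_removeBraces removeBraces removeBraces_alt
  by_cases hp : position = -1
  · simp [hp]
  · rw [if_pos hp, if_neg hp]
    have h0 : (0 : Int) = ((0 : Nat) : Int) := rfl
    rw [h0, loop_eq_find]
    cases hf : findRB (PySem.List.slice equation.toList (some position) none) 0 0 with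
    | none =>
      simp only [hf, slice_split, String.ofList_toList]
    | some j =>
      simp only [hf, slice_take, slice_drop_succ]
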